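-- pv_equiv track=rewrite | github.com/lx-0/pixel-realm | scripts/gen_tutorial_assets.py | make_bubble
-- ===== SOURCE A (Python) =====
-- _ = (0, 0, 0, 0)          # transparent
--
-- def blank(w, h, fill=None):
--     fill = fill or _
--     return [[fill]*w for __ in range(h)]
--
-- def set_px(grid, x, y, color):
--     if 0 <= y < len(grid) and 0 <= x < len(grid[0]):
--         grid[y][x] = color
--
-- BB  = (10,  26,  58,  220)   # bubble fill (deep ocean, slightly transparent)
--
-- BO  = (42,  122, 192, 255)   # bubble outline (sky blue)
--
-- BH  = (144, 208, 248, 255)   # bubble highlight (ice blue)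
--
-- def make_bubble(w, h):
--     """Create a speech bubble frame with rounded corners and tail."""
--     grid = blank(w, h)
--     # Fill interior
--     for y in range(2, h - 4):
--         for x in range(2, w - 2):
--             set_px(grid, x, y, BB)
--     # Top/bottom edges
--     for x in range(2, w - 2):
--         set_px(grid, x, 1, BO)
--         set_px(grid, x, h - 5, BO)
--     # Left/right edges
--     for y in range(2, h - 4):
--         set_px(grid, 1, y, BO)
--         set_px(grid, w - 2, y, BO)
--     # Corners
--     set_px(grid, 2, 1, BO); set_px(grid, 1, 2, BO)
--     set_px(grid, w-3, 1, BO); set_px(grid, w-2, 2, BO)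
--     set_px(grid, 1, h-5, BO); set_px(grid, 2, h-5, BO)
--     set_px(grid, w-2, h-5, BO); set_px(grid, w-3, h-5, BO)
--     # Highlight top edge (inner)
--     for x in range(3, w - 3):
--         set_px(grid, x, 2, BH)
--     # Tail (bottom-center, pointing down)
--     mid = w // 2
--     for i in range(3):
--         set_px(grid, mid - 1 + i, h - 4, BO)
--     set_px(grid, mid - 1, h - 3, BO)
--     set_px(grid, mid, h - 3, BB)
--     set_px(grid, mid + 1, h - 3, BO)
--     set_px(grid, mid, h - 2, BO)
--     return grid
-- ===== SOURCE B (Python) =====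
-- _ = (0, 0, 0, 0)          # transparent
--
-- BB  = (10,  26,  58,  220)   # bubble fill
-- BO  = (42,  122, 192, 255)   # bubble outline
-- BH  = (144, 208, 248, 255)   # bubble highlight
--
--
-- def make_bubble(w, h):
--     """Speech bubble computed pixel-by-pixel from coordinates (no paint layering)."""
--     mid = w // 2
--     corners = ((2, 1), (1, 2), (w - 3, 1), (w - 2, 2),
--                (1, h - 5), (2, h - 5), (w - 2, h - 5), (w - 3, h - 5))
--
--     def px(x, y):
--         # tail (highest precedence: drawn last in the layered original)
--         if y == h - 2 and x == mid:
--             return BO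
--         if y == h - 3 and mid - 1 <= x <= mid + 1:
--             return BB if x == mid else BO
--         if y == h - 4 and mid - 1 <= x <= mid + 1:
--             return BO
--         # inner highlight row
--         if y == 2 and 3 <= x < w - 3:
--             return BH
--         # outline: explicit corner cells, horizontal edges, vertical edges
--         if (x, y) in corners \
--            or ((y == 1 or y == h - 5) and 2 <= x < w - 2) \
--            or ((x == 1 or x == w - 2) and 2 <= y < h - 4):
--             return BO
--         # interior
--         if 2 <= y < h - 4 and 2 <= x < w - 2:
--             return BB
--         return _
--
--     return [[px(x, y) for x in range(w)] for y in range(h)]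
-- ===== Notes on version B (the rewrite author's own statement) =====
-- stated objective: alternative
-- what changed: B computes each pixel's final color directly from its coordinates in one pass (a per-pixel precedence function mirroring last-write-wins), instead of A's layered mutation passes that overwrite an initially blank grid.
import Mathlib
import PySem

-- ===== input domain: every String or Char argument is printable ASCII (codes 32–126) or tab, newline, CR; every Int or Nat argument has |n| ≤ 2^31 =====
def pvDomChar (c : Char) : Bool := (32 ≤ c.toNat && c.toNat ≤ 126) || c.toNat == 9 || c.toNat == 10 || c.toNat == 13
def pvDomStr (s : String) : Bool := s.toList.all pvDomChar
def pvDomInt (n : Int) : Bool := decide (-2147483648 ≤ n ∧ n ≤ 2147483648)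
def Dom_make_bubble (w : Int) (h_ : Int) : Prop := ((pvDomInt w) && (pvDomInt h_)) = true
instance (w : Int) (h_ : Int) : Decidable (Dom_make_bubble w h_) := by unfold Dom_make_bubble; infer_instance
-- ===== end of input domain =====

-- B computes each pixel's color directly from its coordinates in one pass (per-pixel
-- precedence mirroring A's last-write-wins), instead of A's layered overwrite passes.

def pvTrans : List Int := [0, 0, 0, 0]
def pvBB : List Int := [10, 26, 58, 220]
def pvBO : List Int := [42, 122, 192, 255]
def pvBH : List Int := [144, 208, 248, 255]

-- ===== PORT A =====
def blank (w : Int) (h_ : Int) (fill : Option (List Int)) : List (List (List Int)) :=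
  let f := fill.getD pvTrans
  List.replicate h_.toNat (List.replicate w.toNat f)

def set_px (grid : List (List (List Int))) (x y : Int) (color : List Int) :
    List (List (List Int)) :=
  if 0 ≤ y ∧ y < (grid.length : Int) ∧ 0 ≤ x ∧ x < ((grid.headD []).length : Int) then
    grid.set y.toNat ((grid.getD y.toNat []).set x.toNat color)
  else grid

def make_bubble (w : Int) (h_ : Int) : List (List (List Int)) :=
  let grid := blank w h_ none
  -- Fill interior
  let grid := (PySem.List.pyRange 2 (h_ - 4) 1).foldl (fun g y =>
      (PySem.List.pyRange 2 (w - 2) 1).foldl (fun g x => set_px g x y pvBB) g) grid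
  -- Top/bottom edges
  let grid := (PySem.List.pyRange 2 (w - 2) 1).foldl (fun g x =>
      set_px (set_px g x 1 pvBO) x (h_ - 5) pvBO) grid
  -- Left/right edges
  let grid := (PySem.List.pyRange 2 (h_ - 4) 1).foldl (fun g y =>
      set_px (set_px g 1 y pvBO) (w - 2) y pvBO) grid
  -- Corners
  let grid := set_px grid 2 1 pvBO
  let grid := set_px grid 1 2 pvBO
  let grid := set_px grid (w - 3) 1 pvBO
  let grid := set_px grid (w - 2) 2 pvBO
  let grid := set_px grid 1 (h_ - 5) pvBO
  let grid := set_px grid 2 (h_ - 5) pvBO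
  let grid := set_px grid (w - 2) (h_ - 5) pvBO
  let grid := set_px grid (w - 3) (h_ - 5) pvBO
  -- Highlight top edge (inner)
  let grid := (PySem.List.pyRange 3 (w - 3) 1).foldl (fun g x => set_px g x 2 pvBH) grid
  -- Tail
  let mid := PySem.Int.floordiv w 2
  let grid := (PySem.List.pyRange 0 3 1).foldl (fun g i =>
      set_px g (mid - 1 + i) (h_ - 4) pvBO) grid
  let grid := set_px grid (mid - 1) (h_ - 3) pvBO
  let grid := set_px grid mid (h_ - 3) pvBB
  let grid := set_px grid (mid + 1) (h_ - 3) pvBO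
  let grid := set_px grid mid (h_ - 2) pvBO
  grid

-- ===== PORT B =====
-- per-pixel color, precedence from highest (drawn last in A's layering) to lowest
def bubblePx (w : Int) (h_ : Int) (mid : Int) (x : Int) (y : Int) : List Int :=
  if y = h_ - 2 ∧ x = mid then pvBO
  else if y = h_ - 3 ∧ (mid - 1 ≤ x ∧ x ≤ mid + 1) then (if x = mid then pvBB else pvBO)
  else if y = h_ - 4 ∧ (mid - 1 ≤ x ∧ x ≤ mid + 1) then pvBO
  else if y = 2 ∧ (3 ≤ x ∧ x < w - 3) then pvBH
  else if ((x = 2 ∧ y = 1) ∨ (x = 1 ∧ y = 2) ∨ (x = w - 3 ∧ y = 1) ∨ (x = w - 2 ∧ y = 2) ∨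
           (x = 1 ∧ y = h_ - 5) ∨ (x = 2 ∧ y = h_ - 5) ∨ (x = w - 2 ∧ y = h_ - 5) ∨
           (x = w - 3 ∧ y = h_ - 5)) ∨
          ((y = 1 ∨ y = h_ - 5) ∧ (2 ≤ x ∧ x < w - 2)) ∨
          ((x = 1 ∨ x = w - 2) ∧ (2 ≤ y ∧ y < h_ - 4)) then pvBO
  else if (2 ≤ y ∧ y < h_ - 4) ∧ (2 ≤ x ∧ x < w - 2) then pvBB
  else pvTrans

def make_bubble_alt (w : Int) (h_ : Int) : List (List (List Int)) :=
  let mid := PySem.Int.floordiv w 2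
  (PySem.List.pyRange 0 h_ 1).map (fun y =>
    (PySem.List.pyRange 0 w 1).map (fun x => bubblePx w h_ mid x y))

-- ===== PRECONDITION & SPEC =====
def Spec_make_bubble (w : Int) (h_ : Int) (out : List (List (List Int))) : Prop := out = make_bubble_alt w h_
instance (w : Int) (h_ : Int) (out : List (List (List Int))) : Decidable (Spec_make_bubble w h_ out) := by unfold Spec_make_bubble; infer_instance

-- ===== CLAIM (what is proved, stated in full; the proofs are below) =====
def Claim_equal_make_bubble : Prop := ∀ (w : Int) (h_ : Int), Dom_make_bubble w h_ → Spec_make_bubble w h_ (make_bubble w h_)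

-- ===== LEMMAS AND PROOFS =====

def Shaped (g : List (List (List Int))) (H W : Nat) : Prop :=
  g.length = H ∧ ∀ r ∈ g, r.length = W

def cell (g : List (List (List Int))) (yn xn : Nat) : List Int :=
  (g.getD yn []).getD xn []

lemma shaped_blank (w h_ : Int) : Shaped (blank w h_ none) h_.toNat w.toNat := by
  constructor
  · simp [blank]
  · intro r hr
    simp [blank] at hr
    simp [hr.2]

lemma shaped_set_px {g : List (List (List Int))} {H W : Nat} (hg : Shaped g H W)
    (x y : Int) (c : List Int) : Shaped (set_px g x y c) H W := by
  obtain ⟨hlen, hrow⟩ := hg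
  unfold set_px
  split_ifs with hG
  · constructor
    · simpa using hlen
    · intro r hr
      rcases List.mem_or_eq_of_mem_set hr with h | h
      · exact hrow r h
      · subst h
        simp only [List.length_set]
        have hyH : y.toNat < g.length := by omega
        rw [List.getD_eq_getElem _ _ hyH]
        exact hrow _ (List.getElem_mem hyH)
  · exact ⟨hlen, hrow⟩

lemma cell_set_px {g : List (List (List Int))} {H W : Nat} (hg : Shaped g H W)
    {yn xn : Nat} (hy : yn < H) (hx : xn < W) (x y : Int) (c : List Int) :
    cell (set_px g x y c) yn xn =
      if ((yn : Int) = y ∧ (xn : Int) = x) then c else cell g yn xn := by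
  obtain ⟨hlen, hrow⟩ := hg
  have hyH : yn < g.length := by omega
  have hhead : (g.headD []).length = W := by
    cases g with
    | nil => simp at hlen; omega
    | cons r t => exact hrow r (by simp)
  unfold set_px cell
  split_ifs with hG hc hc
  · have hyy : y.toNat = yn := by omega
    have hxx : x.toNat = xn := by omega
    have hrowlen : (g.getD y.toNat []).length = W := by
      rw [List.getD_eq_getElem _ _ (by omega : y.toNat < g.length)]
      exact hrow _ (List.getElem_mem _)
    subst hyy hxx
    have h2' : x.toNat < (g.getD y.toNat []).length := by omega
    have h2 : x.toNat < (g[y.toNat]'hyH).length := by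
      rw [← List.getD_eq_getElem _ _ hyH]; exact h2'
    simp only [List.getD_eq_getElem?_getD, List.getElem?_set]
    simp [hyH, h2]
  · simp only [List.getD_eq_getElem?_getD, List.getElem?_set]
    rcases Decidable.em (y.toNat = yn) with hyy | hyy
    · have hxx : x.toNat ≠ xn := by omega
      subst hyy
      simp [hyH, hxx]
    · simp [hyy]
  · omega
  · rfl

lemma cell_blank (w h_ : Int) {yn xn : Nat} (hy : yn < h_.toNat) (hx : xn < w.toNat) :
    cell (blank w h_ none) yn xn = pvTrans := by
  unfold blank cell
  simp [List.getD_eq_getElem?_getD, hy, hx]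

lemma shaped_foldl {β : Type} {H W : Nat} {body : List (List (List Int)) → β → List (List (List Int))}
    (hb : ∀ g b, Shaped g H W → Shaped (body g b) H W) :
    ∀ (l : List β) (g), Shaped g H W → Shaped (l.foldl body g) H W := by
  intro l
  induction l with
  | nil => intro g hg; simpa using hg
  | cons a t ih => intro g hg; simpa using ih _ (hb g a hg)

-- interior / highlight style row loop: for x in range(a,b): set_px(g, x, yI, c)
lemma cell_fold_row {H W : Nat} (c : List Int) (yI : Int) :
    ∀ (n : Nat) (a b : Int), (b - a).toNat = n →
    ∀ g, Shaped g H W → ∀ (yn xn : Nat), yn < H → xn < W →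
      cell ((PySem.List.pyRange a b 1).foldl (fun g x => set_px g x yI c) g) yn xn
        = if ((yn : Int) = yI ∧ (a ≤ (xn : Int) ∧ (xn : Int) < b)) then c else cell g yn xn := by
  intro n
  induction n with
  | zero =>
    intro a b hab g hg yn xn hy hx
    rw [PySem.List.pyRange_one_eq_nil (by omega)]
    simp only [List.foldl_nil]
    rw [if_neg (by omega)]
  | succ n ih =>
    intro a b hab g hg yn xn hy hx
    rw [PySem.List.pyRange_one_cons (by omega)]
    simp only [List.foldl_cons]
    rw [ih (a + 1) b (by omega) _ (shaped_set_px hg a yI c) yn xn hy hx,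
        cell_set_px hg hy hx]
    split_ifs <;> first | rfl | (exfalso; omega)

-- interior double loop
lemma cell_fold_rect {H W : Nat} (ax bx : Int) :
    ∀ (n : Nat) (ay by_ : Int), (by_ - ay).toNat = n →
    ∀ g, Shaped g H W → ∀ (yn xn : Nat), yn < H → xn < W →
      cell ((PySem.List.pyRange ay by_ 1).foldl (fun g y =>
          (PySem.List.pyRange ax bx 1).foldl (fun g x => set_px g x y pvBB) g) g) yn xn
        = if ((ay ≤ (yn : Int) ∧ (yn : Int) < by_) ∧ (ax ≤ (xn : Int) ∧ (xn : Int) < bx))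
            then pvBB else cell g yn xn := by
  intro n
  induction n with
  | zero =>
    intro ay by_ hab g hg yn xn hy hx
    rw [PySem.List.pyRange_one_eq_nil (show by_ ≤ ay by omega)]
    simp only [List.foldl_nil]
    rw [if_neg (by omega)]
  | succ n ih =>
    intro ay by_ hab g hg yn xn hy hx
    rw [PySem.List.pyRange_one_cons (show ay < by_ by omega)]
    simp only [List.foldl_cons]
    have hg' : Shaped ((PySem.List.pyRange ax bx 1).foldl (fun g x => set_px g x ay pvBB) g) H W :=
      shaped_foldl (fun g b hg => shaped_set_px hg b ay pvBB) _ g hg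
    rw [ih (ay + 1) by_ (by omega) _ hg' yn xn hy hx,
        cell_fold_row pvBB ay (bx - ax).toNat ax bx rfl g hg yn xn hy hx]
    split_ifs <;> first | rfl | (exfalso; omega)

-- top/bottom edges loop
lemma cell_fold_topbot {H W : Nat} (h_ : Int) :
    ∀ (n : Nat) (a b : Int), (b - a).toNat = n →
    ∀ g, Shaped g H W → ∀ (yn xn : Nat), yn < H → xn < W →
      cell ((PySem.List.pyRange a b 1).foldl (fun g x =>
          set_px (set_px g x 1 pvBO) x (h_ - 5) pvBO) g) yn xn
        = if (((yn : Int) = 1 ∨ (yn : Int) = h_ - 5) ∧ (a ≤ (xn : Int) ∧ (xn : Int) < b))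
            then pvBO else cell g yn xn := by
  intro n
  induction n with
  | zero =>
    intro a b hab g hg yn xn hy hx
    rw [PySem.List.pyRange_one_eq_nil (by omega)]
    simp only [List.foldl_nil]
    rw [if_neg (by omega)]
  | succ n ih =>
    intro a b hab g hg yn xn hy hx
    rw [PySem.List.pyRange_one_cons (by omega)]
    simp only [List.foldl_cons]
    have hg1 : Shaped (set_px g a 1 pvBO) H W := shaped_set_px hg a 1 pvBO
    rw [ih (a + 1) b (by omega) _ (shaped_set_px hg1 a (h_ - 5) pvBO) yn xn hy hx,
        cell_set_px hg1 hy hx, cell_set_px hg hy hx]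
    split_ifs <;> first | rfl | (exfalso; omega)

-- left/right edges loop
lemma cell_fold_leftright {H W : Nat} (w : Int) :
    ∀ (n : Nat) (a b : Int), (b - a).toNat = n →
    ∀ g, Shaped g H W → ∀ (yn xn : Nat), yn < H → xn < W →
      cell ((PySem.List.pyRange a b 1).foldl (fun g y =>
          set_px (set_px g 1 y pvBO) (w - 2) y pvBO) g) yn xn
        = if (((xn : Int) = 1 ∨ (xn : Int) = w - 2) ∧ (a ≤ (yn : Int) ∧ (yn : Int) < b))
            then pvBO else cell g yn xn := by
  intro n
  induction n with
  | zero =>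
    intro a b hab g hg yn xn hy hx
    rw [PySem.List.pyRange_one_eq_nil (by omega)]
    simp only [List.foldl_nil]
    rw [if_neg (by omega)]
  | succ n ih =>
    intro a b hab g hg yn xn hy hx
    rw [PySem.List.pyRange_one_cons (by omega)]
    simp only [List.foldl_cons]
    have hg1 : Shaped (set_px g 1 a pvBO) H W := shaped_set_px hg 1 a pvBO
    rw [ih (a + 1) b (by omega) _ (shaped_set_px hg1 (w - 2) a pvBO) yn xn hy hx,
        cell_set_px hg1 hy hx, cell_set_px hg hy hx]
    split_ifs <;> first | rfl | (exfalso; omega)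

-- block lemmas for the per-pixel chain equality
lemma ite_ite_same {p q : Prop} [Decidable p] [Decidable q] (c r : List Int) :
    (if p then c else if q then c else r) = if p ∨ q then c else r := by
  by_cases hp : p <;> by_cases hq : q <;> simp [hp, hq]

lemma blkTail (t m x y : Int) (r s : List Int) (hrs : r = s) :
    (if y = t ∧ x = m + 1 then pvBO else if y = t ∧ x = m then pvBB
      else if y = t ∧ x = m - 1 then pvBO else r)
    = (if y = t ∧ (m - 1 ≤ x ∧ x ≤ m + 1) then (if x = m then pvBB else pvBO) else s) := by
  subst hrs
  split_ifs <;> first | rfl | (exfalso; omega)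

lemma blkRow3 (t m x y : Int) (r s : List Int) (hrs : r = s) :
    (if y = t ∧ x = m - 1 + 2 then pvBO else if y = t ∧ x = m - 1 + 1 then pvBO
      else if y = t ∧ x = m - 1 + 0 then pvBO else r)
    = (if y = t ∧ (m - 1 ≤ x ∧ x ≤ m + 1) then pvBO else s) := by
  subst hrs
  split_ifs <;> first | rfl | (exfalso; omega)

lemma blkOutline (w h_ x y : Int) (r s : List Int) (hrs : r = s) :
    (if y = h_ - 5 ∧ x = w - 3 then pvBO else
     if y = h_ - 5 ∧ x = w - 2 then pvBO else
     if y = h_ - 5 ∧ x = 2 then pvBO else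
     if y = h_ - 5 ∧ x = 1 then pvBO else
     if y = 2 ∧ x = w - 2 then pvBO else
     if y = 1 ∧ x = w - 3 then pvBO else
     if y = 2 ∧ x = 1 then pvBO else
     if y = 1 ∧ x = 2 then pvBO else
     if ((x = 1 ∨ x = w - 2) ∧ (2 ≤ y ∧ y < h_ - 4)) then pvBO else
     if ((y = 1 ∨ y = h_ - 5) ∧ (2 ≤ x ∧ x < w - 2)) then pvBO else r)
    = (if ((x = 2 ∧ y = 1) ∨ (x = 1 ∧ y = 2) ∨ (x = w - 3 ∧ y = 1) ∨ (x = w - 2 ∧ y = 2) ∨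
           (x = 1 ∧ y = h_ - 5) ∨ (x = 2 ∧ y = h_ - 5) ∨ (x = w - 2 ∧ y = h_ - 5) ∨
           (x = w - 3 ∧ y = h_ - 5)) ∨
          ((y = 1 ∨ y = h_ - 5) ∧ (2 ≤ x ∧ x < w - 2)) ∨
          ((x = 1 ∨ x = w - 2) ∧ (2 ≤ y ∧ y < h_ - 4)) then pvBO else s) := by
  subst hrs
  simp only [ite_ite_same]
  refine if_congr ?_ rfl rfl
  constructor
  · rintro (⟨h1,h2⟩|⟨h1,h2⟩|⟨h1,h2⟩|⟨h1,h2⟩|⟨h1,h2⟩|⟨h1,h2⟩|⟨h1,h2⟩|⟨h1,h2⟩|h|h)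
    · exact Or.inl (Or.inr (Or.inr (Or.inr (Or.inr (Or.inr (Or.inr (Or.inr (⟨h2,h1⟩))))))))
    · exact Or.inl (Or.inr (Or.inr (Or.inr (Or.inr (Or.inr (Or.inr (Or.inl ⟨h2,h1⟩)))))))
    · exact Or.inl (Or.inr (Or.inr (Or.inr (Or.inr (Or.inr (Or.inl ⟨h2,h1⟩))))))
    · exact Or.inl (Or.inr (Or.inr (Or.inr (Or.inr (Or.inl ⟨h2,h1⟩)))))
    · exact Or.inl (Or.inr (Or.inr (Or.inr (Or.inl ⟨h2,h1⟩))))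
    · exact Or.inl (Or.inr (Or.inr (Or.inl ⟨h2,h1⟩)))
    · exact Or.inl (Or.inr (Or.inl ⟨h2,h1⟩))
    · exact Or.inl (Or.inl ⟨h2,h1⟩)
    · exact Or.inr (Or.inr h)
    · exact Or.inr (Or.inl h)
  · rintro ((⟨h1,h2⟩|⟨h1,h2⟩|⟨h1,h2⟩|⟨h1,h2⟩|⟨h1,h2⟩|⟨h1,h2⟩|⟨h1,h2⟩|⟨h1,h2⟩)|h|h)
    · exact Or.inr (Or.inr (Or.inr (Or.inr (Or.inr (Or.inr (Or.inr (Or.inl ⟨h2,h1⟩)))))))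
    · exact Or.inr (Or.inr (Or.inr (Or.inr (Or.inr (Or.inr (Or.inl ⟨h2,h1⟩))))))
    · exact Or.inr (Or.inr (Or.inr (Or.inr (Or.inr (Or.inl ⟨h2,h1⟩)))))
    · exact Or.inr (Or.inr (Or.inr (Or.inr (Or.inl ⟨h2,h1⟩))))
    · exact Or.inr (Or.inr (Or.inr (Or.inl ⟨h2,h1⟩)))
    · exact Or.inr (Or.inr (Or.inl ⟨h2,h1⟩))
    · exact Or.inr (Or.inl ⟨h2,h1⟩)
    · exact Or.inl ⟨h2,h1⟩
    · exact Or.inr (Or.inr (Or.inr (Or.inr (Or.inr (Or.inr (Or.inr (Or.inr (Or.inr (h)))))))))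
    · exact Or.inr (Or.inr (Or.inr (Or.inr (Or.inr (Or.inr (Or.inr (Or.inr (Or.inl h))))))))

-- the assembled per-cell characterisation of A equals B's per-pixel function
lemma cell_make_bubble (w h_ : Int) {yn xn : Nat} (hy : yn < h_.toNat) (hx : xn < w.toNat) :
    cell (make_bubble w h_) yn xn
      = bubblePx w h_ (PySem.Int.floordiv w 2) (xn : Int) (yn : Int) := by
  simp only [make_bubble]
  set g0 := blank w h_ none with hG0
  set g1 := (PySem.List.pyRange 2 (h_ - 4) 1).foldl (fun g y =>
      (PySem.List.pyRange 2 (w - 2) 1).foldl (fun g x => set_px g x y pvBB) g) g0 with hG1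
  set g2 := (PySem.List.pyRange 2 (w - 2) 1).foldl (fun g x =>
      set_px (set_px g x 1 pvBO) x (h_ - 5) pvBO) g1 with hG2
  set g3 := (PySem.List.pyRange 2 (h_ - 4) 1).foldl (fun g y =>
      set_px (set_px g 1 y pvBO) (w - 2) y pvBO) g2 with hG3
  set g4 := set_px g3 2 1 pvBO with hG4
  set g5 := set_px g4 1 2 pvBO with hG5
  set g6 := set_px g5 (w - 3) 1 pvBO with hG6
  set g7 := set_px g6 (w - 2) 2 pvBO with hG7
  set g8 := set_px g7 1 (h_ - 5) pvBO with hG8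
  set g9 := set_px g8 2 (h_ - 5) pvBO with hG9
  set g10 := set_px g9 (w - 2) (h_ - 5) pvBO with hG10
  set g11 := set_px g10 (w - 3) (h_ - 5) pvBO with hG11
  set g12 := (PySem.List.pyRange 3 (w - 3) 1).foldl (fun g x => set_px g x 2 pvBH) g11 with hG12
  set mid := PySem.Int.floordiv w 2 with hMid
  set g13 := (PySem.List.pyRange 0 3 1).foldl (fun g i =>
      set_px g (mid - 1 + i) (h_ - 4) pvBO) g12 with hG13
  set g14 := set_px g13 (mid - 1) (h_ - 3) pvBO with hG14
  set g15 := set_px g14 mid (h_ - 3) pvBB with hG15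
  set g16 := set_px g15 (mid + 1) (h_ - 3) pvBO with hG16
  have s0 : Shaped g0 h_.toNat w.toNat := by rw [hG0]; exact shaped_blank w h_
  have s1 : Shaped g1 h_.toNat w.toNat := by
    rw [hG1]
    exact shaped_foldl (fun g y hg =>
      shaped_foldl (fun g x hg => shaped_set_px hg x y pvBB) _ _ hg) _ _ s0
  have s2 : Shaped g2 h_.toNat w.toNat := by
    rw [hG2]
    exact shaped_foldl (fun g x hg =>
      shaped_set_px (shaped_set_px hg x 1 pvBO) x (h_ - 5) pvBO) _ _ s1
  have s3 : Shaped g3 h_.toNat w.toNat := by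
    rw [hG3]
    exact shaped_foldl (fun g y hg =>
      shaped_set_px (shaped_set_px hg 1 y pvBO) (w - 2) y pvBO) _ _ s2
  have s4 : Shaped g4 h_.toNat w.toNat := by rw [hG4]; exact shaped_set_px s3 _ _ _
  have s5 : Shaped g5 h_.toNat w.toNat := by rw [hG5]; exact shaped_set_px s4 _ _ _
  have s6 : Shaped g6 h_.toNat w.toNat := by rw [hG6]; exact shaped_set_px s5 _ _ _
  have s7 : Shaped g7 h_.toNat w.toNat := by rw [hG7]; exact shaped_set_px s6 _ _ _
  have s8 : Shaped g8 h_.toNat w.toNat := by rw [hG8]; exact shaped_set_px s7 _ _ _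
  have s9 : Shaped g9 h_.toNat w.toNat := by rw [hG9]; exact shaped_set_px s8 _ _ _
  have s10 : Shaped g10 h_.toNat w.toNat := by rw [hG10]; exact shaped_set_px s9 _ _ _
  have s11 : Shaped g11 h_.toNat w.toNat := by rw [hG11]; exact shaped_set_px s10 _ _ _
  have s12 : Shaped g12 h_.toNat w.toNat := by
    rw [hG12]
    exact shaped_foldl (fun g x hg => shaped_set_px hg x 2 pvBH) _ _ s11
  have s13 : Shaped g13 h_.toNat w.toNat := by
    rw [hG13]
    exact shaped_foldl (fun g i hg => shaped_set_px hg (mid - 1 + i) (h_ - 4) pvBO) _ _ s12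
  have s14 : Shaped g14 h_.toNat w.toNat := by rw [hG14]; exact shaped_set_px s13 _ _ _
  have s15 : Shaped g15 h_.toNat w.toNat := by rw [hG15]; exact shaped_set_px s14 _ _ _
  have s16 : Shaped g16 h_.toNat w.toNat := by rw [hG16]; exact shaped_set_px s15 _ _ _
  rw [cell_set_px s16 hy hx]
  rw [hG16, cell_set_px s15 hy hx]
  rw [hG15, cell_set_px s14 hy hx]
  rw [hG14, cell_set_px s13 hy hx]
  rw [hG13, show PySem.List.pyRange 0 3 1 = [0, 1, 2] from by decide]
  simp only [List.foldl_cons, List.foldl_nil]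
  rw [cell_set_px (shaped_set_px (shaped_set_px s12 _ _ _) _ _ _) hy hx,
      cell_set_px (shaped_set_px s12 _ _ _) hy hx,
      cell_set_px s12 hy hx]
  rw [hG12, cell_fold_row pvBH 2 ((w - 3) - 3).toNat 3 (w - 3) rfl g11 s11 yn xn hy hx]
  rw [hG11, cell_set_px s10 hy hx]
  rw [hG10, cell_set_px s9 hy hx]
  rw [hG9, cell_set_px s8 hy hx]
  rw [hG8, cell_set_px s7 hy hx]
  rw [hG7, cell_set_px s6 hy hx]
  rw [hG6, cell_set_px s5 hy hx]
  rw [hG5, cell_set_px s4 hy hx]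
  rw [hG4, cell_set_px s3 hy hx]
  rw [hG3, cell_fold_leftright w ((h_ - 4) - 2).toNat 2 (h_ - 4) rfl g2 s2 yn xn hy hx]
  rw [hG2, cell_fold_topbot h_ ((w - 2) - 2).toNat 2 (w - 2) rfl g1 s1 yn xn hy hx]
  rw [hG1, cell_fold_rect 2 (w - 2) ((h_ - 4) - 2).toNat 2 (h_ - 4) rfl g0 s0 yn xn hy hx]
  rw [hG0, cell_blank w h_ hy hx]
  simp only [bubblePx]
  refine if_congr Iff.rfl rfl ?_
  refine blkTail _ _ _ _ _ _ ?_
  refine blkRow3 _ _ _ _ _ _ ?_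
  refine if_congr Iff.rfl rfl ?_
  exact blkOutline _ _ _ _ _ _ rfl

lemma shaped_make_bubble (w h_ : Int) : Shaped (make_bubble w h_) h_.toNat w.toNat := by
  simp only [make_bubble]
  refine shaped_set_px (shaped_set_px (shaped_set_px (shaped_set_px
    (shaped_foldl ?_ _ _
    (shaped_foldl ?_ _ _
    (shaped_set_px (shaped_set_px (shaped_set_px (shaped_set_px (shaped_set_px (shaped_set_px
      (shaped_set_px (shaped_set_px
    (shaped_foldl ?_ _ _
    (shaped_foldl ?_ _ _
    (shaped_foldl ?_ _ _
    (shaped_blank w h_)))) _ _ _) _ _ _) _ _ _) _ _ _) _ _ _) _ _ _) _ _ _) _ _ _))) _ _ _)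
    _ _ _) _ _ _) _ _ _
  · exact fun g i hg => shaped_set_px hg _ _ _
  · exact fun g x hg => shaped_set_px hg _ _ _
  · exact fun g y hg => shaped_set_px (shaped_set_px hg _ _ _) _ _ _
  · exact fun g x hg => shaped_set_px (shaped_set_px hg _ _ _) _ _ _
  · exact fun g y hg => shaped_foldl (fun g x hg => shaped_set_px hg _ _ _) _ _ hg

-- ===== VERDICT (by name: the statement is the Claim_ definition above) =====
theorem make_bubble_spec : Claim_equal_make_bubble := by
  intro w h_ _hd
  unfold Spec_make_bubble
  obtain ⟨hlen, hrow⟩ := shaped_make_bubble w h_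
  have haltlen : (make_bubble_alt w h_).length = h_.toNat := by
    simp [make_bubble_alt, PySem.List.length_pyRange_one]
  apply List.ext_getElem (by omega)
  intro yn hy1 hy2
  apply List.ext_getElem
  · rw [hrow _ (List.getElem_mem hy1)]
    simp [make_bubble_alt, PySem.List.length_pyRange_one]
  · intro xn hx1 hx2
    have hyn : yn < h_.toNat := by omega
    have hxn : xn < w.toNat := by
      have := hrow _ (List.getElem_mem hy1); omega
    have hcell := cell_make_bubble w h_ hyn hxn
    unfold cell at hcell
    rw [List.getD_eq_getElem _ _ hy1] at hcell
    rw [List.getD_eq_getElem _ _ hx1] at hcell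
    rw [hcell]
    simp [make_bubble_alt, PySem.List.getElem_pyRange_one]
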